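-- pv_equiv track=rewrite | github.com/softkleenex/arc-prize-2025-gold | hybrid_solver.py | has_regular_pattern
-- ===== SOURCE A (Python) =====
-- from typing import List, Dict, Tuple, Callable, Optional
--
-- def has_regular_pattern(grid: List[List]) -> bool:
--     """Check if grid has regular pattern"""
--     # Simple check for repeating rows or columns
--     h, w = len(grid), len(grid[0])
--
--     # Check rows
--     for period in range(1, h // 2 + 1):
--         matches = True
--         for i in range(period, h, period):
--             if i + period <= h:
--                 if grid[i:i+period] != grid[0:period]:
--                     matches = False
--                     break
--         if matches:
--             return True
--
--     return False
-- ===== SOURCE B (Python) =====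
-- def has_regular_pattern(grid):
--     """KMP: one pass builds the failure (longest-border) array over the rows;
--     each candidate period is then decided by walking the border chain of the
--     truncated prefix, with no row-block comparisons at all."""
--     h = len(grid)
--     # fail[m] = length of the longest proper border of the first m rows
--     fail = [0] * (h + 1)
--     k = 0
--     for i in range(1, h):
--         while k > 0 and grid[i] != grid[k]:
--             k = fail[k]
--         if grid[i] == grid[k]:
--             k += 1
--         fail[i + 1] = k
--     # p is a period of the first m rows iff m - p is a border of them,
--     # i.e. iff m - p lies on the chain m, fail[m], fail[fail[m]], ...
--     for p in range(1, h // 2 + 1):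
--         m = h - h % p
--         b = m
--         while b > m - p:
--             b = fail[b]
--         if b == m - p:
--             return True
--     return False
-- ===== Notes on version B (the rewrite author's own statement) =====
-- stated objective: alternative
-- what changed: B replaces A's per-period block-slice comparisons by the KMP failure (longest-border) array built once over the rows; each candidate period p is then decided by walking the border chain of the truncated prefix (p is a period iff m-p is a border), so the period-testing phase compares no rows at all.
import Mathlib
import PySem

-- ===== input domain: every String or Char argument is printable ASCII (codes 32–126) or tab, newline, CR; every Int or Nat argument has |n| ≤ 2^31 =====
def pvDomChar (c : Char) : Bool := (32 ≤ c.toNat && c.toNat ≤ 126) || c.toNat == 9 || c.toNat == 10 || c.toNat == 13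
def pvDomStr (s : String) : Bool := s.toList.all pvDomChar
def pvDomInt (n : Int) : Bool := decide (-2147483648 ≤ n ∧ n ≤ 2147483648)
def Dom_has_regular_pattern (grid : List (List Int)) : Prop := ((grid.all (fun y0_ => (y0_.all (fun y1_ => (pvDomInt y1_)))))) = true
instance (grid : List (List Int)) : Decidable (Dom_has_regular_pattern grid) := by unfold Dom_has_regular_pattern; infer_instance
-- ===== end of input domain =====

-- B builds the KMP failure (longest-border) array over the rows once and decides each
-- candidate period by walking the border chain, instead of A's per-period block-slice
-- comparisons (objective: alternative).

-- ===== PORT A =====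
def has_regular_pattern (grid : List (List Int)) : Bool :=
  let h : Int := grid.length
  -- Python also computes w = len(grid[0]), which raises IndexError on the empty grid
  -- (excluded by Pre_) and is never used afterwards.
  (PySem.List.pyRange 1 (PySem.Int.floordiv h 2 + 1) 1).any (fun period =>
    (PySem.List.pyRange period h period).foldl
      (fun ok i =>
        if i + period ≤ h then
          if PySem.List.slice grid (some i) (some (i + period)) ≠ PySem.List.slice grid (some 0) (some period)
          then false else ok
        else ok) true)

-- ===== PORT B =====
-- the inner while loop 'while k > 0 and grid[i] != grid[k]: k = fail[k]' of Source B;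
-- fuel makes it total (fuel = k suffices since fail[k] < k on the reachable states)
def kmpShrink (grid : List (List Int)) (F : List Nat) (xi : List Int) : Nat → Nat → Nat
  | 0, k => k
  | fuel + 1, k =>
      if 0 < k ∧ xi ≠ grid.getD k [] then kmpShrink grid F xi fuel (F.getD k 0) else k

-- one iteration of Source B's 'for i in range(1, h)' loop building the failure array
def kmpStep (grid : List (List Int)) (st : List Nat × Nat) (i : Nat) : List Nat × Nat :=
  let k1 := kmpShrink grid st.1 (grid.getD i []) st.2 st.2
  let k2 := if grid.getD i [] = grid.getD k1 [] then k1 + 1 else k1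
  (st.1.set (i + 1) k2, k2)

def buildFail (grid : List (List Int)) : List Nat × Nat :=
  (List.range' 1 (grid.length - 1)).foldl (kmpStep grid) (List.replicate (grid.length + 1) 0, 0)

-- the while loop 'while b > m - p: b = fail[b]' of Source B (fuel = b suffices)
def chainWalk (F : List Nat) (c : Nat) : Nat → Nat → Nat
  | 0, b => b
  | fuel + 1, b => if c < b then chainWalk F c fuel (F.getD b 0) else b

def has_regular_pattern_alt (grid : List (List Int)) : Bool :=
  let h := grid.length
  let F := (buildFail grid).1
  (List.range' 1 (h / 2)).any (fun p =>
    let m := h - h % p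
    chainWalk F (m - p) m m == m - p)

-- ===== PRECONDITION & SPEC =====
-- Pre_ excludes only the empty grid, on which A raises IndexError at grid[0].
def Pre_has_regular_pattern (grid : List (List Int)) : Prop := grid ≠ []
instance (grid : List (List Int)) : Decidable (Pre_has_regular_pattern grid) := by unfold Pre_has_regular_pattern; infer_instance
def pvWitness_has_regular_pattern : List (List Int) := [[0, 1], [0, 1]]

def Spec_has_regular_pattern (grid : List (List Int)) (out : Bool) : Prop := out = has_regular_pattern_alt grid
instance (grid : List (List Int)) (out : Bool) : Decidable (Spec_has_regular_pattern grid out) := by unfold Spec_has_regular_pattern; infer_instance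

-- ===== CLAIM (what is proved, stated in full; the proofs are below) =====
def Claim_equal_has_regular_pattern : Prop := ∀ (grid : List (List Int)), Dom_has_regular_pattern grid → Pre_has_regular_pattern grid → Spec_has_regular_pattern grid (has_regular_pattern grid)

-- ===== LEMMAS AND PROOFS =====

-- b is a border-or-the-whole of the first m rows of s (b = m and b = 0 always count)
def IsBp (s : List (List Int)) (m b : Nat) : Prop :=
  b ≤ m ∧ m ≤ s.length ∧ ∀ t, t < b → s.getD t [] = s.getD (m - b + t) []

def isBb (s : List (List Int)) (m b : Nat) : Bool :=
  decide (b ≤ m) && decide (m ≤ s.length) &&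
    (List.range b).all (fun t => s.getD t [] == s.getD (m - b + t) [])

lemma isBb_iff (s : List (List Int)) (m b : Nat) : isBb s m b = true ↔ IsBp s m b := by
  simp [isBb, IsBp, List.all_eq_true, List.mem_range, and_assoc]

-- length of the longest PROPER border of the first m rows
def MaxB (s : List (List Int)) (m : Nat) : Nat :=
  Nat.findGreatest (fun b => isBb s m b = true) (m - 1)

lemma isB_zero (s : List (List Int)) (m : Nat) (hm : m ≤ s.length) : IsBp s m 0 :=
  ⟨Nat.zero_le _, hm, fun t ht => absurd ht (Nat.not_lt_zero t)⟩

lemma isB_self (s : List (List Int)) (m : Nat) (hm : m ≤ s.length) : IsBp s m m :=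
  ⟨le_rfl, hm, fun t _ => by rw [show m - m + t = t by omega]⟩

lemma isB_trans (s : List (List Int)) {m b b' : Nat} (h1 : IsBp s m b) (h2 : IsBp s b b') :
    IsBp s m b' := by
  obtain ⟨hb1, hm, hp1⟩ := h1
  obtain ⟨hb2, _, hp2⟩ := h2
  refine ⟨le_trans hb2 hb1, hm, fun t ht => ?_⟩
  have e1 := hp2 t ht
  have e2 := hp1 (b - b' + t) (by omega)
  rw [show m - b + (b - b' + t) = m - b' + t by omega] at e2
  rw [e1, ← e2]

lemma isB_down (s : List (List Int)) {m b b' : Nat} (h1 : IsBp s m b) (h2 : IsBp s m b')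
    (hle : b' ≤ b) : IsBp s b b' := by
  obtain ⟨hb1, hm, hp1⟩ := h1
  obtain ⟨hb2, _, hp2⟩ := h2
  refine ⟨hle, le_trans hb1 hm, fun t ht => ?_⟩
  have e1 := hp2 t ht
  have e2 := hp1 (b - b' + t) (by omega)
  rw [show m - b + (b - b' + t) = m - b' + t by omega] at e2
  rw [e1, e2]

lemma maxB_lt (s : List (List Int)) (m : Nat) (hm : 1 ≤ m) : MaxB s m < m :=
  lt_of_le_of_lt (Nat.findGreatest_le _) (by omega)

lemma maxB_isB (s : List (List Int)) (m : Nat) (hn : m ≤ s.length) : IsBp s m (MaxB s m) :=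
  (isBb_iff s m _).mp
    (Nat.findGreatest_spec (P := fun b => isBb s m b = true) (Nat.zero_le (m - 1))
      ((isBb_iff s m 0).mpr (isB_zero s m hn)))

lemma maxB_ge (s : List (List Int)) {m b : Nat} (hb : IsBp s m b) (hlt : b < m) :
    b ≤ MaxB s m :=
  Nat.le_findGreatest (by omega) ((isBb_iff s m b).mpr hb)

-- extending a border by one matching row
lemma isB_succ_iff (s : List (List Int)) (i b : Nat) (hi : i < s.length) (hb : b ≤ i) :
    IsBp s (i + 1) (b + 1) ↔ (IsBp s i b ∧ s.getD b [] = s.getD i []) := by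
  constructor
  · rintro ⟨h1, h2, h3⟩
    refine ⟨⟨hb, by omega, fun t ht => ?_⟩, ?_⟩
    · have := h3 t (by omega)
      rwa [show i + 1 - (b + 1) + t = i - b + t by omega] at this
    · have := h3 b (by omega)
      rwa [show i + 1 - (b + 1) + b = i by omega] at this
  · rintro ⟨⟨h1, h2, h3⟩, h4⟩
    refine ⟨by omega, by omega, fun t ht => ?_⟩
    rcases Nat.lt_or_ge t b with h | h
    · rw [show i + 1 - (b + 1) + t = i - b + t by omega]
      exact h3 t h
    · have : t = b := by omega
      subst this
      rw [show i + 1 - (t + 1) + t = i by omega]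
      exact h4

def FailSpecUpto (s : List (List Int)) (F : List Nat) (i : Nat) : Prop :=
  ∀ m, 1 ≤ m → m ≤ i → F.getD m 0 = MaxB s m

lemma shrink_spec (s : List (List Int)) (F : List Nat) (xi : List Int) (i : Nat)
    (hFS : FailSpecUpto s F i) (hi : i ≤ s.length) :
    ∀ fuel k, k ≤ fuel → IsBp s i k → k < i →
    (∀ b, IsBp s i b → b < i → k < b → s.getD b [] ≠ xi) →
    IsBp s i (kmpShrink s F xi fuel k) ∧ kmpShrink s F xi fuel k < i ∧
      (0 < kmpShrink s F xi fuel k → s.getD (kmpShrink s F xi fuel k) [] = xi) ∧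
      (∀ b, IsBp s i b → b < i → kmpShrink s F xi fuel k < b → s.getD b [] ≠ xi) := by
  intro fuel
  induction fuel with
  | zero =>
    intro k hk hIsB hki hmax
    have hk0 : k = 0 := by omega
    subst hk0
    exact ⟨hIsB, hki, fun h => by simp [kmpShrink] at h, hmax⟩
  | succ fuel ih =>
    intro k hk hIsB hki hmax
    rw [kmpShrink]
    by_cases hcond : 0 < k ∧ xi ≠ s.getD k []
    · rw [if_pos hcond]
      have hFk : F.getD k 0 = MaxB s k := hFS k hcond.1 (le_of_lt hki)
      have hmb : MaxB s k < k := maxB_lt s k hcond.1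
      have hkn : k ≤ s.length := le_trans (le_of_lt hki) hi
      apply ih (F.getD k 0)
      · omega
      · rw [hFk]; exact isB_trans s hIsB (maxB_isB s k hkn)
      · omega
      · intro b hb hbi hgt
        rcases Nat.lt_trichotomy b k with hlt | heq | hgt2
        · -- F.getD k 0 < b < k : would be a proper border of k larger than MaxB s k
          exfalso
          have : IsBp s k b := isB_down s hIsB hb (le_of_lt hlt)
          have := maxB_ge s this hlt
          omega
        · subst heq; exact fun he => hcond.2 he.symm
        · exact hmax b hb hbi hgt2
    · rw [if_neg hcond]
      refine ⟨hIsB, hki, fun hpos => ?_, hmax⟩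
      by_contra hne
      exact hcond ⟨hpos, fun he => hne he.symm⟩

lemma step_maxB (s : List (List Int)) (F : List Nat) (i k : Nat)
    (h1 : 1 ≤ i) (hi : i < s.length) (hFS : FailSpecUpto s F i) (hk : k = MaxB s i) :
    (if s.getD i [] = s.getD (kmpShrink s F (s.getD i []) k k) [] then
        kmpShrink s F (s.getD i []) k k + 1
      else kmpShrink s F (s.getD i []) k k) = MaxB s (i + 1) := by
  have hin : i ≤ s.length := le_of_lt hi
  have hinit : ∀ b, IsBp s i b → b < i → k < b → s.getD b [] ≠ s.getD i [] := by
    intro b hb hbi hgt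
    exfalso
    have := maxB_ge s hb hbi
    omega
  obtain ⟨hrB, hri, hrval, hrmax⟩ :=
    shrink_spec s F (s.getD i []) i hFS hin k k le_rfl
      (hk ▸ maxB_isB s i hin) (hk ▸ maxB_lt s i h1) hinit
  set r := kmpShrink s F (s.getD i []) k k with hr
  by_cases hmatch : s.getD i [] = s.getD r []
  · rw [if_pos hmatch]
    apply Nat.le_antisymm
    · exact maxB_ge s ((isB_succ_iff s i r hi (by omega)).mpr ⟨hrB, hmatch.symm⟩) (by omega)
    · rcases Nat.eq_zero_or_pos (MaxB s (i + 1)) with h0 | hpos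
      · omega
      · obtain ⟨c, hc⟩ : ∃ c, MaxB s (i + 1) = c + 1 := ⟨MaxB s (i + 1) - 1, by omega⟩
        have hlt : MaxB s (i + 1) < i + 1 := maxB_lt s (i + 1) (by omega)
        have hB := maxB_isB s (i + 1) (by omega)
        rw [hc] at hB hlt
        obtain ⟨hcB, hceq⟩ := (isB_succ_iff s i c hi (by omega)).mp hB
        by_cases hcr : r < c
        · exact absurd (hceq.trans rfl) (by
            have := hrmax c hcB (by omega) hcr
            exact fun he => this (he.symm ▸ hceq))
        · omega
  · rw [if_neg hmatch]
    have hr0 : r = 0 := by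
      by_contra hne
      exact hmatch (hrval (by omega)).symm
    rcases Nat.eq_zero_or_pos (MaxB s (i + 1)) with h0 | hpos
    · omega
    · exfalso
      obtain ⟨c, hc⟩ : ∃ c, MaxB s (i + 1) = c + 1 := ⟨MaxB s (i + 1) - 1, by omega⟩
      have hlt : MaxB s (i + 1) < i + 1 := maxB_lt s (i + 1) (by omega)
      have hB := maxB_isB s (i + 1) (by omega)
      rw [hc] at hB hlt
      obtain ⟨hcB, hceq⟩ := (isB_succ_iff s i c hi (by omega)).mp hB
      rcases Nat.eq_zero_or_pos c with hc0 | hcpos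
      · subst hc0
        rw [hr0] at hmatch
        exact hmatch hceq.symm
      · exact hrmax c hcB (by omega) (by omega) hceq

-- the fold of buildFail establishes the failure-array specification
lemma buildFail_inv (s : List (List Int)) (hn : 1 ≤ s.length) :
    ∀ j, j ≤ s.length - 1 →
      ((List.range' 1 j).foldl (kmpStep s) (List.replicate (s.length + 1) 0, 0)).1.length = s.length + 1 ∧
      FailSpecUpto s ((List.range' 1 j).foldl (kmpStep s) (List.replicate (s.length + 1) 0, 0)).1 (j + 1) ∧
      ((List.range' 1 j).foldl (kmpStep s) (List.replicate (s.length + 1) 0, 0)).2 = MaxB s (j + 1) := by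
  intro j
  induction j with
  | zero =>
    intro _
    refine ⟨by simp, ?_, ?_⟩
    · intro m hm1 hm2
      have hm : m = 1 := by omega
      subst hm
      simp [MaxB, List.getD]
    · simp [MaxB]
  | succ j ih =>
    intro hj
    obtain ⟨hlen, hFS, hk⟩ := ih (by omega)
    rw [List.range'_concat, List.foldl_append, List.foldl_cons, List.foldl_nil, Nat.one_mul]
    set st := (List.range' 1 j).foldl (kmpStep s) (List.replicate (s.length + 1) 0, 0) with hst
    have hi1 : 1 ≤ 1 + j := by omega
    have hilt : 1 + j < s.length := by omega
    have hnew : (if s.getD (1 + j) [] = s.getD (kmpShrink s st.1 (s.getD (1 + j) []) st.2 st.2) [] then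
        kmpShrink s st.1 (s.getD (1 + j) []) st.2 st.2 + 1
      else kmpShrink s st.1 (s.getD (1 + j) []) st.2 st.2) = MaxB s (1 + j + 1) :=
      step_maxB s st.1 (1 + j) st.2 hi1 hilt (by
        intro m hm1 hm2
        exact hFS m hm1 (by omega)) (by rw [hk]; congr 1; omega)
    constructor
    · simp [kmpStep, hlen]
    constructor
    · intro m hm1 hm2
      rcases Nat.lt_or_ge m (1 + j + 1) with hlt | hge
      · have : (kmpStep s st (1 + j)).1.getD m 0 = st.1.getD m 0 := by
          simp only [kmpStep]
          simp only [List.getD_eq_getElem?_getD]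
          rw [List.getElem?_set_ne (by omega)]
        rw [this]
        exact hFS m hm1 (by omega)
      · have hm : m = 1 + j + 1 := by omega
        subst hm
        simp only [kmpStep]
        rw [List.getD_eq_getElem?_getD, List.getElem?_set_self (by omega)]
        simpa [show j + 1 + 1 = 1 + j + 1 by omega] using hnew
    · simp only [kmpStep]
      rw [show j + 1 + 1 = 1 + j + 1 by omega]
      exact hnew

lemma walk_spec (s : List (List Int)) (F : List Nat)
    (hFS : ∀ m, 1 ≤ m → m ≤ s.length → F.getD m 0 = MaxB s m)
    (m0 c : Nat) (_hc : c ≤ m0) :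
    ∀ fuel b, b ≤ fuel → IsBp s m0 b →
      (∀ b', IsBp s m0 b' → b < b' → c < b') →
      (chainWalk F c fuel b = c ↔ IsBp s m0 c) := by
  intro fuel
  induction fuel with
  | zero =>
    intro b hb hIsB hskip
    have hb0 : b = 0 := by omega
    subst hb0
    rw [chainWalk]
    constructor
    · intro h; rw [← h]; exact hIsB
    · intro h
      by_contra hne
      have : 0 < c := by omega
      have := hskip c h (by omega)
      omega
  | succ fuel ih =>
    intro b hb hIsB hskip
    rw [chainWalk]
    by_cases hcb : c < b
    · rw [if_pos hcb]
      have hb1 : 1 ≤ b := by omega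
      have hbn : b ≤ s.length := le_trans hIsB.1 hIsB.2.1
      have hFb : F.getD b 0 = MaxB s b := hFS b hb1 hbn
      have hmb : MaxB s b < b := maxB_lt s b hb1
      apply ih (F.getD b 0)
      · omega
      · rw [hFb]; exact isB_trans s hIsB (maxB_isB s b hbn)
      · intro b' hb' hgt
        rcases Nat.lt_trichotomy b' b with hlt | heq | hgt2
        · exfalso
          have : IsBp s b b' := isB_down s hIsB hb' (le_of_lt hlt)
          have := maxB_ge s this hlt
          omega
        · omega
        · exact hskip b' hb' hgt2
    · rw [if_neg hcb]
      constructor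
      · intro h; rw [← h]; exact hIsB
      · intro h
        by_contra hne
        have : b < c := by omega
        have := hskip c h this
        omega

-- period p of the first m rows ⟷ border of length m - p
lemma period_iff_border (s : List (List Int)) (m p : Nat) (hpm : p ≤ m) (hm : m ≤ s.length) :
    IsBp s m (m - p) ↔ ∀ j, p ≤ j → j < m → s.getD j [] = s.getD (j - p) [] := by
  constructor
  · rintro ⟨_, _, h⟩ j hpj hjm
    have := h (j - p) (by omega)
    rw [show m - (m - p) + (j - p) = j by omega] at this
    exact this.symm
  · intro h
    refine ⟨by omega, hm, fun t ht => ?_⟩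
    have hpt := h (p + t) (by omega) (by omega)
    rw [show p + t - p = t by omega] at hpt
    rw [show m - (m - p) + t = p + t by omega]
    exact hpt.symm

lemma shift_iff_mod (s : List (List Int)) (m p : Nat) (hp : 0 < p) :
    (∀ j, p ≤ j → j < m → s.getD j [] = s.getD (j - p) []) ↔
    (∀ j, p ≤ j → j < m → s.getD j [] = s.getD (j % p) []) := by
  have hmod : ∀ j, p ≤ j → j % p = (j - p) % p := by
    intro j hpj
    have h0 := Nat.add_mod_left p (j - p)
    rw [show p + (j - p) = j by omega] at h0
    exact h0
  constructor
  · intro h j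
    induction j using Nat.strong_induction_on with
    | _ j ihj =>
      intro hpj hjm
      have h1 := h j hpj hjm
      rcases Nat.lt_or_ge (j - p) p with hlt | hge
      · rw [h1, hmod j hpj, Nat.mod_eq_of_lt hlt]
      · have h2 := ihj (j - p) (by omega) hge (by omega)
        rw [h1, h2, hmod j hpj]
  · intro h j hpj hjm
    rcases Nat.lt_or_ge (j - p) p with hlt | hge
    · rw [h j hpj hjm, hmod j hpj, Nat.mod_eq_of_lt hlt]
    · have h2 := h (j - p) hge (by omega)
      rw [h j hpj hjm, hmod j hpj, ← h2]

-- the pointwise characterisation both versions are equivalent to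
def PerPoint (s : List (List Int)) (pn : Nat) : Prop :=
  ∀ j : Nat, pn ≤ j → j < s.length - s.length % pn → s.getD j [] = s.getD (j % pn) []

-- A's inner loop over one period ⟷ PerPoint
lemma sliceA_iff (grid : List (List Int)) (pn : Nat) (hp : 0 < pn) :
    (∀ i ∈ PySem.List.pyRange (pn : Int) (grid.length : Int) (pn : Int),
        i + (pn : Int) ≤ (grid.length : Int) →
        PySem.List.slice grid (some i) (some (i + (pn : Int))) = PySem.List.slice grid (some 0) (some (pn : Int)))
    ↔ PerPoint grid pn := by
  have hpz : (0 : Int) < (pn : Int) := by exact_mod_cast hp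
  constructor
  · intro hA j hpj hjlt
    have hL := Nat.div_add_mod grid.length pn
    have hJ := Nat.div_add_mod j pn
    have hmod : j % pn < pn := Nat.mod_lt _ hp
    have hj : j < grid.length := by omega
    have hm : j % pn < grid.length := by omega
    have hq1 : 1 ≤ j / pn := (Nat.one_le_div_iff hp).mpr hpj
    have hqlt : j / pn < grid.length / pn := by
      apply Nat.lt_of_mul_lt_mul_left (a := pn)
      omega
    set i : Nat := pn * (j / pn) with hi
    have hige : pn ≤ i := by
      have := Nat.mul_le_mul_left pn hq1
      omega
    have hiple : i + pn ≤ grid.length := by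
      have h1 : pn * (j / pn + 1) ≤ pn * (grid.length / pn) := Nat.mul_le_mul_left pn (by omega)
      have h2 : pn * (j / pn + 1) = pn * (j / pn) + pn := by ring
      omega
    have hmem : ((i : Nat) : Int) ∈ PySem.List.pyRange (pn : Int) (grid.length : Int) (pn : Int) := by
      rw [PySem.List.mem_pyRange_iff_of_pos hpz]
      refine ⟨by exact_mod_cast hige, by exact_mod_cast (by omega : i < grid.length), ?_⟩
      refine ⟨((j / pn : Nat) : Int) - 1, ?_⟩
      have : (i : Int) = (pn : Int) * ((j / pn : Nat) : Int) := by exact_mod_cast congrArg Nat.cast hi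
      rw [this]; ring
    have hsl := hA (i : Int) hmem (by exact_mod_cast hiple)
    rw [PySem.List.slice_natCast_add, PySem.List.slice_zero_start, PySem.List.slice_to_natCast] at hsl
    have h1 : ((grid.drop i).take pn)[j % pn]? = some grid[j] := by
      rw [List.getElem?_take, if_pos hmod, List.getElem?_drop]
      have : i + j % pn = j := by omega
      rw [this, List.getElem?_eq_getElem hj]
    have h2 : (grid.take pn)[j % pn]? = some grid[j % pn] := by
      rw [List.getElem?_take, if_pos hmod, List.getElem?_eq_getElem hm]
    rw [hsl, h2] at h1
    rw [List.getD_eq_getElem _ _ hj, List.getD_eq_getElem _ _ hm]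
    exact (Option.some_injective _ h1).symm
  · intro hP i hi hiple
    rw [PySem.List.mem_pyRange_iff_of_pos hpz] at hi
    obtain ⟨hle, hlt, hdvd⟩ := hi
    have hi0 : 0 ≤ i := le_trans (le_of_lt hpz) hle
    set inn : Nat := i.toNat with hinn
    have hic : (inn : Int) = i := Int.toNat_of_nonneg hi0
    have hpnle : pn ≤ inn := by omega
    have hipleN : inn + pn ≤ grid.length := by omega
    have hdvdN : pn ∣ inn := by
      obtain ⟨c, hc⟩ := hdvd
      have hc0 : 0 ≤ c := by
        by_contra hcn
        have : (pn : Int) * c < 0 := mul_neg_of_pos_of_neg hpz (by omega)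
        omega
      refine ⟨c.toNat + 1, ?_⟩
      have hcc : ((c.toNat : Nat) : Int) = c := Int.toNat_of_nonneg hc0
      have : ((pn * (c.toNat + 1) : Nat) : Int) = (inn : Int) := by
        push_cast
        rw [hcc, hic]
        linarith
      exact_mod_cast this.symm
    rw [← hic, PySem.List.slice_natCast_add, PySem.List.slice_zero_start, PySem.List.slice_to_natCast]
    apply List.ext_getElem
    · simp; omega
    · intro t h1 h2
      rw [List.getElem_take, List.getElem_drop, List.getElem_take]
      have htpn : t < pn := by simp at h2; exact h2.1
      have hj : inn + t < grid.length := by omega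
      have hjm : (inn + t) % pn = t := by
        obtain ⟨q, hq⟩ := hdvdN
        rw [hq, Nat.add_comm, Nat.add_mul_mod_self_left, Nat.mod_eq_of_lt htpn]
      have hfull : inn + pn ≤ grid.length - grid.length % pn := by
        obtain ⟨q, hq⟩ := hdvdN
        have hL := Nat.div_add_mod grid.length pn
        have hR : grid.length % pn < pn := Nat.mod_lt _ hp
        have hqQ : q < grid.length / pn := by
          apply Nat.lt_of_mul_lt_mul_left (a := pn)
          omega
        have h2' := Nat.mul_le_mul_left pn (show q + 1 ≤ grid.length / pn by omega)
        have e2 : pn * (q + 1) = pn * q + pn := by ring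
        omega
      have hres := hP (inn + t) (by omega) (by omega)
      rw [hjm] at hres
      have ht' : t < grid.length := by omega
      rw [List.getD_eq_getElem _ _ hj, List.getD_eq_getElem _ _ ht'] at hres
      exact hres

-- B's per-period check ⟷ PerPoint
lemma walkB_iff (grid : List (List Int)) (pn : Nat) (hp : 0 < pn)
    (h2p : 2 * pn ≤ grid.length) :
    (chainWalk (buildFail grid).1 (grid.length - grid.length % pn - pn)
        (grid.length - grid.length % pn) (grid.length - grid.length % pn)
      = grid.length - grid.length % pn - pn)
    ↔ PerPoint grid pn := by
  have hn1 : 1 ≤ grid.length := by omega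
  obtain ⟨_, hFS, _⟩ := buildFail_inv grid hn1 (grid.length - 1) le_rfl
  have hFS' : ∀ m, 1 ≤ m → m ≤ grid.length → (buildFail grid).1.getD m 0 = MaxB grid m := by
    intro m hm1 hm2
    exact hFS m hm1 (by omega)
  set m := grid.length - grid.length % pn with hm
  have hmodlt : grid.length % pn < pn := Nat.mod_lt _ hp
  have hmn : m ≤ grid.length := by omega
  have hpm : pn ≤ m := by omega
  rw [walk_spec grid (buildFail grid).1 hFS' m (m - pn) (by omega) m m le_rfl
    (isB_self grid m hmn) (fun b' hb' hgt => absurd (le_trans hb'.1 le_rfl) (by omega))]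
  rw [period_iff_border grid m pn hpm hmn, shift_iff_mod grid m pn hp]
  rfl

lemma A_iff (grid : List (List Int)) :
    has_regular_pattern grid = true ↔
      ∃ pn : Nat, 1 ≤ pn ∧ pn ≤ grid.length / 2 ∧ PerPoint grid pn := by
  unfold has_regular_pattern
  simp only [List.any_eq_true]
  have hcast : PySem.Int.floordiv ((grid.length : Nat) : Int) 2 = ((grid.length / 2 : Nat) : Int) :=
    PySem.Int.floordiv_natCast _ _
  have hfold : ∀ p : Int,
      (PySem.List.pyRange p (grid.length : Int) p).foldl
        (fun ok i =>
          if i + p ≤ (grid.length : Int) then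
            if PySem.List.slice grid (some i) (some (i + p)) ≠ PySem.List.slice grid (some 0) (some p)
            then false else ok
          else ok) true
      = (true && !(PySem.List.pyRange p (grid.length : Int) p).any
          (fun i => decide (i + p ≤ (grid.length : Int) ∧
            PySem.List.slice grid (some i) (some (i + p)) ≠ PySem.List.slice grid (some 0) (some p)))) := by
    intro p
    rw [← PySem.List.foldl_if_false_eq]
    apply PySem.List.foldl_congr_mem
    intro acc i _
    by_cases h1 : i + p ≤ (grid.length : Int) <;>
      by_cases h2 : PySem.List.slice grid (some i) (some (i + p)) = PySem.List.slice grid (some 0) (some p) <;>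
      simp [h1, h2]
  constructor
  · rintro ⟨p, hpmem, hf⟩
    rw [PySem.List.mem_pyRange_one, hcast] at hpmem
    set pn : Nat := p.toNat with hpn
    have hpc : (pn : Int) = p := Int.toNat_of_nonneg (by omega)
    have hpnpos : 0 < pn := by omega
    refine ⟨pn, by omega, by omega, ?_⟩
    rw [hfold p] at hf
    simp only [Bool.true_and, Bool.not_eq_eq_eq_not, Bool.not_true, List.any_eq_false,
      decide_eq_true_eq, not_and, not_not] at hf
    rw [← (sliceA_iff grid pn hpnpos)]
    intro i hi hle
    rw [hpc] at hi hle ⊢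
    exact hf i hi hle
  · rintro ⟨pn, h1, h2, hPP⟩
    have hpnpos : 0 < pn := by omega
    refine ⟨(pn : Int), ?_, ?_⟩
    · rw [PySem.List.mem_pyRange_one, hcast]
      constructor
      · exact_mod_cast h1
      · have : (pn : Int) ≤ ((grid.length / 2 : Nat) : Int) := by exact_mod_cast h2
        omega
    · rw [hfold ((pn : Nat) : Int)]
      simp only [Bool.true_and, Bool.not_eq_eq_eq_not, Bool.not_true, List.any_eq_false,
        decide_eq_true_eq, not_and, not_not]
      intro i hi hle
      exact (sliceA_iff grid pn hpnpos).mpr hPP i hi hle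

lemma B_iff (grid : List (List Int)) :
    has_regular_pattern_alt grid = true ↔
      ∃ pn : Nat, 1 ≤ pn ∧ pn ≤ grid.length / 2 ∧ PerPoint grid pn := by
  unfold has_regular_pattern_alt
  simp only [List.any_eq_true, beq_iff_eq, List.mem_range'_1]
  constructor
  · rintro ⟨pn, hmem, hwalk⟩
    have h1 : 1 ≤ pn := hmem.1
    have h2 : pn ≤ grid.length / 2 := by omega
    have h2p : 2 * pn ≤ grid.length := by
      have := (Nat.le_div_iff_mul_le (by norm_num)).mp h2
      omega
    exact ⟨pn, h1, h2, (walkB_iff grid pn (by omega) h2p).mp hwalk⟩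
  · rintro ⟨pn, h1, h2, hPP⟩
    have h2p : 2 * pn ≤ grid.length := by
      have := (Nat.le_div_iff_mul_le (by norm_num)).mp h2
      omega
    exact ⟨pn, ⟨h1, by omega⟩, (walkB_iff grid pn (by omega) h2p).mpr hPP⟩

-- ===== VERDICT (by name: the statement is the Claim_ definition above) =====
theorem has_regular_pattern_spec : Claim_equal_has_regular_pattern := by
  intro grid _ _
  unfold Spec_has_regular_pattern
  rw [Bool.eq_iff_iff, A_iff, B_iff]
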